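-- pv_equiv track=rewrite | github.com/moli-xia/91pinse | downloader.py | pick_best_media_url
-- ===== SOURCE A (Python) =====
-- def pick_best_media_url(urls):
--     if not urls:
--         return None
--     mp4s = [u for u in urls if ".mp4" in u.lower()]
--     if mp4s:
--         return mp4s[0]
--     m3u8s = [u for u in urls if ".m3u8" in u.lower()]
--     if m3u8s:
--         return m3u8s[0]
--     return urls[0]
-- ===== SOURCE B (Python) =====
-- def pick_best_media_url(urls):
--     if not urls:
--         return None
--     first_m3u8 = None
--     for u in urls:
--         lu = u.lower()
--         if ".mp4" in lu:
--             return u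
--         if ".m3u8" in lu and first_m3u8 is None:
--             first_m3u8 = u
--     return first_m3u8 if first_m3u8 is not None else urls[0]
-- ===== Notes on version B (the rewrite author's own statement) =====
-- stated objective: simpler
-- what changed: Replaces A's two full list-building filter passes with one short-circuiting scan that returns on the first .mp4 and remembers the first .m3u8 in a variable.
import Mathlib
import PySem

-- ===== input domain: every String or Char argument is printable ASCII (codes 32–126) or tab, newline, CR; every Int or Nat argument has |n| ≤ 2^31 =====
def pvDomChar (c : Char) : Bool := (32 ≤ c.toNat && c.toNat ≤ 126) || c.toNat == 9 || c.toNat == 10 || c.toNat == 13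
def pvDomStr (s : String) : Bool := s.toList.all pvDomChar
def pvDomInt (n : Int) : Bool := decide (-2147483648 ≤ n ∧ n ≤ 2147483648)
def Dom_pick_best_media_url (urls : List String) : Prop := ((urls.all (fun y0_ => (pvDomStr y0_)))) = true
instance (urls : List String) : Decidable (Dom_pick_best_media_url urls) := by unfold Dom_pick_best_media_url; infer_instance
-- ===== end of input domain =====

-- B replaces A's two list-building filter passes with one short-circuiting scan; objective: simpler.


-- ===== PORT A =====
def pick_best_media_url (urls : List String) : Option String :=
  if urls = [] then none
  else
    let mp4s := urls.filter (fun u => PySem.Str.isIn ".mp4" (PySem.Str.lower u))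
    match mp4s with
    | u :: _ => some u
    | [] =>
      let m3u8s := urls.filter (fun u => PySem.Str.isIn ".m3u8" (PySem.Str.lower u))
      match m3u8s with
      | v :: _ => some v
      | [] => urls.head?

-- ===== PORT B =====
-- one pass: return on first .mp4, remember the first .m3u8 in the accumulator
def pickLoop : List String → Option String → Option String
  | [], first_m3u8 => first_m3u8
  | u :: rest, first_m3u8 =>
    let lu := PySem.Str.lower u
    if PySem.Str.isIn ".mp4" lu then some u
    else pickLoop rest
      (if PySem.Str.isIn ".m3u8" lu && first_m3u8.isNone then some u else first_m3u8)

def pick_best_media_url_alt (urls : List String) : Option String :=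
  match urls with
  | [] => none
  | u0 :: _ =>
    match pickLoop urls none with
    | some v => some v
    | none => some u0

-- ===== PRECONDITION & SPEC =====
def Spec_pick_best_media_url (urls : List String) (out : Option String) : Prop := out = pick_best_media_url_alt urls
instance (urls : List String) (out : Option String) : Decidable (Spec_pick_best_media_url urls out) := by unfold Spec_pick_best_media_url; infer_instance

-- ===== CLAIM (what is proved, stated in full; the proofs are below) =====
def Claim_equal_pick_best_media_url : Prop := ∀ (urls : List String), Dom_pick_best_media_url urls → Spec_pick_best_media_url urls (pick_best_media_url urls)

-- ===== LEMMAS AND PROOFS =====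
theorem pickLoop_eq (l : List String) (fm : Option String) :
    pickLoop l fm =
      ((l.find? (fun u => PySem.Str.isIn ".mp4" (PySem.Str.lower u))).or
        (fm.or (l.find? (fun u => PySem.Str.isIn ".m3u8" (PySem.Str.lower u))))) := by
  induction l generalizing fm with
  | nil => cases fm <;> simp [pickLoop]
  | cons u rest ih =>
    by_cases hp : PySem.Chars.isIn ['.', 'm', 'p', '4'] (PySem.Chars.lower u.toList) = true
    · simp [pickLoop, hp]
    · by_cases hq : PySem.Chars.isIn ['.', 'm', '3', 'u', '8'] (PySem.Chars.lower u.toList) = true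
      · cases fm <;> simp [pickLoop, hp, hq, ih]
      · simp [pickLoop, hp, hq, ih]

theorem head?_filter_find? (p : String → Bool) (l : List String) :
    (l.filter p).head? = l.find? p := by
  induction l with
  | nil => rfl
  | cons u rest ih => by_cases h : p u = true <;> simp [h, ih]

-- ===== VERDICT (by name: the statement is the Claim_ definition above) =====
theorem pick_best_media_url_spec : Claim_equal_pick_best_media_url := by
  intro urls _
  unfold Spec_pick_best_media_url
  cases urls with
  | nil => rfl
  | cons u0 rest =>
    show pick_best_media_url (u0 :: rest) = _
    unfold pick_best_media_url pick_best_media_url_alt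
    rw [pickLoop_eq, Option.none_or,
        ← head?_filter_find? (fun u => PySem.Str.isIn ".mp4" (PySem.Str.lower u)),
        ← head?_filter_find? (fun u => PySem.Str.isIn ".m3u8" (PySem.Str.lower u))]
    simp only [if_neg (List.cons_ne_nil u0 rest)]
    cases hmp : (u0 :: rest).filter (fun u => PySem.Str.isIn ".mp4" (PySem.Str.lower u)) with
    | cons v t => rfl
    | nil =>
      cases hm3 : (u0 :: rest).filter (fun u => PySem.Str.isIn ".m3u8" (PySem.Str.lower u)) with
      | cons w t2 => rfl
      | nil => rfl
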